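-- pv_equiv track=rewrite | github.com/czplwsk/TiMKoD | timkod/zad2/ShannonFano_encoder.py | podziel
-- ===== SOURCE A (Python) =====
-- from copy import deepcopy
--
-- def suma(rozklad):
--     suma = 0
--     for i in rozklad:
--         suma += rozklad[i]
--     return suma
--
-- def podziel(rozklad):
--     l = dict()
--     p = deepcopy(rozklad)
--     poprzednia = 0
--     for i in rozklad.keys():
--         if suma(l) > suma(p):
--             break
--         if len(p) == 1:
--             break
--         poprzednia = suma(p) - suma(l)
--         item = i
--         l[item] = p.pop(item)
--
--     if suma(l)-suma(p) > poprzednia: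
--         p[item] = l.pop(item)
--         p = dict(sorted(p.items(), key=lambda item: item[1], reverse=True))
--
--     return l, p
-- ===== SOURCE B (Python) =====
-- def podziel(rozklad):
--     items = list(rozklad.items())
--     n = len(items)
--     total = sum(v for _, v in items)
--     left = 0          # running sum of the left part
--     j = 0             # number of items moved left
--     poprzednia = 0
--     while j < n:
--         if left > total - left:
--             break
--         if n - j == 1:
--             break
--         poprzednia = total - 2 * left
--         left += items[j][1]
--         j += 1
--     if 2 * left - total > poprzednia and j >= 1:
--         l = dict(items[:j - 1])
--         moved = items[j:] + [items[j - 1]]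
--         p = dict(sorted(moved, key=lambda kv: kv[1], reverse=True))
--     else:
--         l = dict(items[:j])
--         p = dict(items[j:])
--     return l, p
-- ===== Notes on version B (the rewrite author's own statement) =====
-- stated objective: faster
-- what changed: Replaces A's repeated suma() rescans and dict pops (quadratic) with a single pass over the item list maintaining running prefix sums, then builds the two halves by slicing
import Mathlib
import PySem

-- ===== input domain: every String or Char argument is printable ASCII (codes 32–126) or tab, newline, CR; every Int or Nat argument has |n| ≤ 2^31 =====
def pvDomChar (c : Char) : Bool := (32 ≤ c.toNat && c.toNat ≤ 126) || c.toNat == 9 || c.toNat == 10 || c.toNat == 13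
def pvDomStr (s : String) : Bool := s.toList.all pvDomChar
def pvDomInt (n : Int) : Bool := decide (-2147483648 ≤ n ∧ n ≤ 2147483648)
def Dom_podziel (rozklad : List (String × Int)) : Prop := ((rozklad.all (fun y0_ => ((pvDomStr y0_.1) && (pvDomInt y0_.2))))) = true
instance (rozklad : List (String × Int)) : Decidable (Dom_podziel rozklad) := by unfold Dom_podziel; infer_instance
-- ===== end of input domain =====

-- B replaces A's repeated suma() rescans and dict pops with one pass over the item list keeping running prefix sums.


-- ===== PORT A =====
-- suma(rozklad): iterate the dict's keys, adding the looked-up value each time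
def suma (d : PySem.Dict String Int) : Int :=
  d.keys.foldl (fun acc k => acc + (d.get? k).getD 0) 0

-- the 'for i in rozklad.keys(): …' loop with its two breaks; state = (l, p, poprzednia, item)
def podzielLoop : List String → PySem.Dict String Int → PySem.Dict String Int → Int → Option String →
    PySem.Dict String Int × PySem.Dict String Int × Int × Option String
  | [], l, p, poprz, it => (l, p, poprz, it)
  | i :: ks, l, p, poprz, it =>
    if suma l > suma p then (l, p, poprz, it)
    else if p.size = 1 then (l, p, poprz, it)
    else
      match p.pop? i with
      | some (v, p') => podzielLoop ks (l.insert i v) p' (suma p - suma l) (some i)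
      | none => (l, p, poprz, it)

def podziel (rozklad : List (String × Int)) : (List (String × Int)) × (List (String × Int)) :=
  let r := PySem.Dict.ofList rozklad
  match podzielLoop r.keys PySem.Dict.empty r 0 none with
  | (l, p, poprzednia, item) =>
    if suma l - suma p > poprzednia then
      match item with
      | some it =>
        (match l.pop? it with
         | some (v, l') =>
            let p' := p.insert it v
            (l'.items, (PySem.Dict.ofList (PySem.List.sorted p'.items (fun kv => kv.2) true)).items)
         | none => (l.items, p.items))
      | none => (l.items, p.items)
    else (l.items, p.items)

-- ===== PORT B =====
-- Source B's while loop: state = (j, left, poprzednia); the list argument is items[j:]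
def podzielAltLoop (n : Nat) (total : Int) : List (String × Int) → Nat → Int → Int → Nat × Int × Int
  | [], j, left, poprz => (j, left, poprz)
  | kv :: rest, j, left, poprz =>
    if left > total - left then (j, left, poprz)
    else if n - j = 1 then (j, left, poprz)
    else podzielAltLoop n total rest (j + 1) (left + kv.2) (total - 2 * left)

def podziel_alt (rozklad : List (String × Int)) : (List (String × Int)) × (List (String × Int)) :=
  let items := (PySem.Dict.ofList rozklad).items
  let n := items.length
  let total := (items.map (fun kv => kv.2)).sum
  match podzielAltLoop n total items 0 0 0 with
  | (j, left, poprz) =>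
    if 2 * left - total > poprz ∧ 1 ≤ j then
      let moved := items.drop j ++ (items.drop (j - 1)).take 1
      ((PySem.Dict.ofList (items.take (j - 1))).items,
       (PySem.Dict.ofList (PySem.List.sorted moved (fun kv => kv.2) true)).items)
    else ((PySem.Dict.ofList (items.take j)).items, (PySem.Dict.ofList (items.drop j)).items)

-- ===== PRECONDITION & SPEC =====
-- Pre_ excludes exactly the inputs on which A raises UnboundLocalError: dicts whose values sum to a negative number.
def Pre_podziel (rozklad : List (String × Int)) : Prop :=
  0 ≤ (((PySem.Dict.ofList rozklad).items.map (fun kv => kv.2)).sum)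
instance (rozklad : List (String × Int)) : Decidable (Pre_podziel rozklad) := by unfold Pre_podziel; infer_instance
def pvWitness_podziel : (List (String × Int)) := [("a", 1), ("b", 2)]

def Spec_podziel (rozklad : List (String × Int)) (out : (List (String × Int)) × (List (String × Int))) : Prop := out = podziel_alt rozklad
instance (rozklad : List (String × Int)) (out : (List (String × Int)) × (List (String × Int))) : Decidable (Spec_podziel rozklad out) := by unfold Spec_podziel; infer_instance

-- ===== CLAIM (what is proved, stated in full; the proofs are below) =====
def Claim_equal_podziel : Prop := ∀ (rozklad : List (String × Int)), Dom_podziel rozklad → Pre_podziel rozklad → Spec_podziel rozklad (podziel rozklad)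

-- ===== LEMMAS AND PROOFS =====

-- dict(l) is l itself when l's keys are distinct
theorem items_ofList_self (l : List (String × Int)) (h : (l.map Prod.fst).Nodup) :
    (PySem.Dict.ofList l).items = l := by
  rw [PySem.Dict.ofList, PySem.Dict.update]
  simpa using PySem.Dict.items_foldl_insert_fresh l (fun a => a.1) (fun a => a.2) PySem.Dict.empty
    (fun a _ => PySem.Dict.contains_empty a.1) h

theorem suma_eq_sum (d : PySem.Dict String Int) (h : d.keys.Nodup) :
    suma d = (d.values).sum := by
  rw [suma, PySem.List.foldl_add, PySem.Dict.values_eq_map_keys d h 0]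
  simp [PySem.Dict.getD]

theorem suma_mk (q : List (String × Int)) (h : (q.map Prod.fst).Nodup) :
    suma ⟨q⟩ = (q.map (fun kv => kv.2)).sum := by
  rw [suma_eq_sum ⟨q⟩ (by simpa [PySem.Dict.keys_mk] using h), PySem.Dict.values_mk]

theorem get?_mk_last (xs : List (String × Int)) (k : String) (v : Int)
    (h : k ∉ xs.map Prod.fst) :
    (PySem.Dict.mk (xs ++ [(k, v)])).get? k = some v := by
  have : List.find? (fun p => p.1 == k) xs = none := by
    rw [List.find?_eq_none]
    intro p hp hbe
    exact h (List.mem_map.2 ⟨p, hp, by simpa using hbe⟩)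
  simp [PySem.Dict.get?, List.find?_append, this]

theorem erase_mk_last (xs : List (String × Int)) (k : String) (v : Int)
    (h : k ∉ xs.map Prod.fst) :
    (PySem.Dict.mk (xs ++ [(k, v)])).erase k = ⟨xs⟩ := by
  rw [PySem.Dict.erase]
  congr 1
  rw [List.filter_append]
  have h1 : List.filter (fun p => !p.1 == k) xs = xs := by
    rw [List.filter_eq_self]
    intro p hp
    simp only [Bool.not_eq_eq_eq_not, Bool.not_true, beq_eq_false_iff_ne]
    exact fun he => h (List.mem_map.2 ⟨p, hp, he⟩)
  simp [h1]

theorem insert_mk_fresh (q : List (String × Int)) (k : String) (v : Int)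
    (h : k ∉ q.map Prod.fst) :
    (PySem.Dict.mk q).insert k v = ⟨q ++ [(k, v)]⟩ := by
  apply PySem.Dict.ext
  rw [PySem.Dict.items_insert_of_not_contains]
  rw [← Bool.not_eq_true]
  intro hc
  exact h (by simpa [PySem.Dict.keys_mk] using (PySem.Dict.contains_iff_mem_keys _ _).1 hc)

theorem erase_mk_head (kv : String × Int) (rest : List (String × Int))
    (h : kv.1 ∉ rest.map Prod.fst) :
    (PySem.Dict.mk (kv :: rest)).erase kv.1 = ⟨rest⟩ := by
  rw [PySem.Dict.erase]
  congr 1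
  rw [List.filter_cons, if_neg (by simp)]
  rw [List.filter_eq_self]
  intro p hp
  simp only [Bool.not_eq_eq_eq_not, Bool.not_true, beq_eq_false_iff_ne]
  exact fun he => h (List.mem_map.2 ⟨p, hp, he⟩)

-- the 'item' variable: key of the last pair moved so far (none before the first move)
def itOf (q : List (String × Int)) : Option String := q.getLast?.map Prod.fst

-- simulation invariant: A's dict loop, started on the suffix r with prefix q already moved,
-- agrees with B's prefix-sum loop; the final split is take/drop of the item list
theorem loop_sim (r : List (String × Int)) : ∀ (q : List (String × Int)) (poprz : Int),
    ((q ++ r).map Prod.fst).Nodup →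
    let s := podzielAltLoop (q ++ r).length (((q ++ r).map (fun kv => kv.2)).sum) r q.length ((q.map (fun kv => kv.2)).sum) poprz
    q.length ≤ s.1 ∧ s.1 ≤ (q ++ r).length ∧
    s.2.1 = (((q ++ r).take s.1).map (fun kv => kv.2)).sum ∧
    (s.1 = q.length → s.2.2 = poprz) ∧
    podzielLoop (r.map Prod.fst) ⟨q⟩ ⟨r⟩ poprz (itOf q) =
      (⟨(q ++ r).take s.1⟩, ⟨(q ++ r).drop s.1⟩, s.2.2, itOf ((q ++ r).take s.1)) := by
  induction r with
  | nil =>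
    intro q poprz hnd
    simp [podzielAltLoop, podzielLoop]
  | cons kv rest ih =>
    intro q poprz hnd
    have hndq : (q.map Prod.fst).Nodup := by
      have := hnd; rw [List.map_append, List.nodup_append] at this; exact this.1
    have hndr : ((kv :: rest).map Prod.fst).Nodup := by
      have := hnd; rw [List.map_append, List.nodup_append] at this; exact this.2.1
    have hk_q : kv.1 ∉ q.map Prod.fst := by
      have := hnd; rw [List.map_append, List.nodup_append] at this
      exact fun hm => this.2.2 kv.1 hm kv.1 (by simp) rfl
    have hk_rest : kv.1 ∉ rest.map Prod.fst := by
      have := hndr; rw [List.map_cons, List.nodup_cons] at this; exact this.1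
    have hsumq : suma ⟨q⟩ = (q.map (fun kv => kv.2)).sum := suma_mk q hndq
    have hsumr : suma ⟨kv :: rest⟩ = ((kv :: rest).map (fun kv => kv.2)).sum := suma_mk _ hndr
    have htot : (((q ++ kv :: rest)).map (fun kv => kv.2)).sum
        = (q.map (fun kv => kv.2)).sum + ((kv :: rest).map (fun kv => kv.2)).sum := by
      rw [List.map_append, List.sum_append]
    by_cases hc1 : (q.map (fun kv => kv.2)).sum > (((q ++ kv :: rest)).map (fun kv => kv.2)).sum - (q.map (fun kv => kv.2)).sum
    · have hcA : suma ⟨q⟩ > suma ⟨kv :: rest⟩ := by rw [hsumq, hsumr]; omega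
      simp only [podzielAltLoop, podzielLoop, List.map_cons, if_pos hc1, if_pos hcA]
      refine ⟨le_refl _, ?_, ?_, ?_, ?_⟩
      · simp
      · simp [List.take_left]
      · intro _; trivial
      · simp [List.take_left, List.drop_left]
    · by_cases hc2 : (q ++ kv :: rest).length - q.length = 1
      · have hcA : (PySem.Dict.mk (kv :: rest)).size = 1 := by
          simp only [PySem.Dict.size]
          simp at hc2 ⊢; omega
        have hcA1 : ¬ (suma ⟨q⟩ > suma ⟨kv :: rest⟩) := by rw [hsumq, hsumr]; omega
        simp only [podzielAltLoop, podzielLoop, List.map_cons, if_neg hc1, if_pos hc2,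
          if_neg (by exact hcA1), if_pos hcA]
        refine ⟨le_refl _, ?_, ?_, ?_, ?_⟩
        · simp
        · simp [List.take_left]
        · intro _; trivial
        · simp [List.take_left, List.drop_left]
      · have hcA1 : ¬ (suma ⟨q⟩ > suma ⟨kv :: rest⟩) := by rw [hsumq, hsumr]; omega
        have hcA2 : ¬ ((PySem.Dict.mk (kv :: rest)).size = 1) := by
          simp only [PySem.Dict.size]
          simp at hc2 ⊢; omega
        have hpop : (PySem.Dict.mk (kv :: rest)).pop? kv.1 = some (kv.2, ⟨rest⟩) := by
          rw [PySem.Dict.pop?]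
          have hg : (PySem.Dict.mk (kv :: rest)).get? kv.1 = some kv.2 := by
            simp [PySem.Dict.get?]
          rw [hg, erase_mk_head kv rest hk_rest]
          rfl
        have hins : (PySem.Dict.mk q).insert kv.1 kv.2 = ⟨q ++ [kv]⟩ := by
          have := insert_mk_fresh q kv.1 kv.2 hk_q
          simpa using this
        have hpo : suma ⟨kv :: rest⟩ - suma ⟨q⟩
            = (((q ++ kv :: rest)).map (fun kv => kv.2)).sum - 2 * (q.map (fun kv => kv.2)).sum := by
          rw [hsumq, hsumr]; omega
        have hit : (some kv.1 : Option String) = itOf (q ++ [kv]) := by simp [itOf]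
        have hnd' : (((q ++ [kv]) ++ rest).map Prod.fst).Nodup := by
          simpa [List.append_assoc] using hnd
        have ih' := ih (q ++ [kv])
          ((((q ++ kv :: rest)).map (fun kv => kv.2)).sum - 2 * (q.map (fun kv => kv.2)).sum) hnd'
        simp only [podzielAltLoop, podzielLoop, List.map_cons, if_neg hc1, if_neg hc2,
          if_neg (by exact hcA1), if_neg hcA2, hpop, hins, hpo, hit]
        simp only [List.append_assoc, List.singleton_append, List.cons_append, List.nil_append,
          List.length_append, List.length_cons, List.length_nil, List.map_append, List.map_cons,
          List.map_nil, List.sum_append, List.sum_cons, List.sum_nil, add_zero, zero_add] at ih' ⊢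
        obtain ⟨h1, h2, h3, h4, h5⟩ := ih'
        refine ⟨by omega, by omega, ?_, by omega, ?_⟩
        · convert h3 using 3 <;> omega
        · convert h5 using 4 <;> omega

theorem podziel_eq (rozklad : List (String × Int))
    (hpre : 0 ≤ (((PySem.Dict.ofList rozklad).items.map (fun kv => kv.2)).sum)) :
    podziel rozklad = podziel_alt rozklad := by
  unfold podziel podziel_alt
  dsimp only
  have hnd : (((PySem.Dict.ofList rozklad).items).map Prod.fst).Nodup := by
    have := PySem.Dict.nodup_keys_ofList (κ := String) (ν := Int) rozklad
    simpa [PySem.Dict.keys] using this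
  generalize hitems : (PySem.Dict.ofList rozklad).items = items at *
  have hs := loop_sim items [] 0 (by simpa using hnd)
  simp only [List.nil_append, List.length_nil, List.map_nil, List.sum_nil] at hs
  obtain ⟨-, hle, hleft, hpo0, hloop⟩ := hs
  have hsc : podzielLoop (PySem.Dict.ofList rozklad).keys PySem.Dict.empty (PySem.Dict.ofList rozklad) 0 none
      = podzielLoop (items.map Prod.fst) ⟨[]⟩ ⟨items⟩ 0 (itOf []) := by
    rw [← hitems]; rfl
  rw [hsc, hloop]
  dsimp only
  set s := podzielAltLoop items.length ((items.map (fun kv => kv.2)).sum) items 0 0 0 with hsdef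
  set j := s.1 with hj
  -- sums of the two halves
  have hndtake : ∀ m : Nat, ((items.take m).map Prod.fst).Nodup :=
    fun m => hnd.sublist ((items.take_sublist m).map Prod.fst)
  have hnddrop : ∀ m : Nat, ((items.drop m).map Prod.fst).Nodup :=
    fun m => hnd.sublist ((items.drop_sublist m).map Prod.fst)
  have hsplit : ((items.take j).map (fun kv => kv.2)).sum + ((items.drop j).map (fun kv => kv.2)).sum
      = (items.map (fun kv => kv.2)).sum := by
    rw [← List.sum_append, ← List.map_append, List.take_append_drop]
  have hsumt : suma ⟨items.take j⟩ = ((items.take j).map (fun kv => kv.2)).sum := suma_mk _ (hndtake j)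
  have hsumd : suma ⟨items.drop j⟩ = ((items.drop j).map (fun kv => kv.2)).sum := suma_mk _ (hnddrop j)
  by_cases hjz : j = 0
  · -- nothing moved: poprz = 0, the final condition is false on both sides
    have hpo : s.2.2 = 0 := hpo0 hjz
    have hA : ¬ (suma ⟨items.take j⟩ - suma ⟨items.drop j⟩ > s.2.2) := by
      rw [hsumt, hsumd, hpo, hjz]; simp; omega
    have hB : ¬ (2 * s.2.1 - (items.map (fun kv => kv.2)).sum > s.2.2 ∧ 1 ≤ j) := by
      rw [hjz]; simp
    rw [if_neg hA, if_neg hB]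
    rw [items_ofList_self _ (hndtake j), items_ofList_self _ (hnddrop j)]
  · -- j ≥ 1
    have hj1 : 1 ≤ j := Nat.one_le_iff_ne_zero.2 hjz
    have hjlt : j - 1 < items.length := by omega
    have htake : items.take j = items.take (j - 1) ++ [items[j - 1]] := by
      have := List.take_add_one (l := items) (i := j - 1)
      rw [List.getElem?_eq_getElem hjlt] at this
      simpa [Nat.sub_add_cancel hj1] using this
    have hdrop : items.drop (j - 1) = items[j - 1] :: items.drop j := by
      have := List.drop_eq_getElem_cons hjlt
      rwa [Nat.sub_add_cancel hj1] at this
    have hsplitkeys : items.map Prod.fst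
        = (items.take (j - 1)).map Prod.fst ++ items[j - 1].1 :: (items.drop j).map Prod.fst := by
      conv_lhs => rw [← List.take_append_drop (j - 1) items]
      rw [hdrop, List.map_append, List.map_cons]
    have hnotin : items[j - 1].1 ∉ (items.take (j - 1)).map Prod.fst
        ∧ items[j - 1].1 ∉ (items.drop j).map Prod.fst := by
      have := hnd; rw [hsplitkeys, List.nodup_append] at this
      refine ⟨fun hm => this.2.2 _ hm _ (by simp) rfl, ?_⟩
      have := this.2.1; rw [List.nodup_cons] at this; exact this.1
    have hitof : itOf (items.take j) = some items[j - 1].1 := by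
      rw [htake, itOf, List.getLast?_concat]; rfl
    by_cases hc : 2 * s.2.1 - (items.map (fun kv => kv.2)).sum > s.2.2
    · -- backtrack branch on both sides
      have hA : suma ⟨items.take j⟩ - suma ⟨items.drop j⟩ > s.2.2 := by
        rw [hsumt, hsumd]; omega
      rw [if_pos hA, if_pos ⟨hc, hj1⟩, hitof]
      dsimp only
      have hpop : (PySem.Dict.mk (items.take j)).pop? items[j - 1].1
          = some (items[j - 1].2, ⟨items.take (j - 1)⟩) := by
        rw [PySem.Dict.pop?]
        have hg : (PySem.Dict.mk (items.take j)).get? items[j - 1].1 = some items[j - 1].2 := by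
          rw [htake]
          have := get?_mk_last (items.take (j-1)) items[j - 1].1 items[j - 1].2 hnotin.1
          simpa using this
        have he : (PySem.Dict.mk (items.take j)).erase items[j - 1].1 = ⟨items.take (j - 1)⟩ := by
          rw [htake]
          have := erase_mk_last (items.take (j-1)) items[j - 1].1 items[j - 1].2 hnotin.1
          simpa using this
        rw [hg, he]; rfl
      rw [hpop]
      dsimp only
      have hins : (PySem.Dict.mk (items.drop j)).insert items[j - 1].1 items[j - 1].2
          = ⟨items.drop j ++ [items[j - 1]]⟩ := by
        have := insert_mk_fresh (items.drop j) items[j - 1].1 items[j - 1].2 hnotin.2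
        simpa using this
      rw [hins]
      rw [items_ofList_self _ (hndtake (j - 1))]
      rw [hdrop]
      simp
    · have hA : ¬ (suma ⟨items.take j⟩ - suma ⟨items.drop j⟩ > s.2.2) := by
        rw [hsumt, hsumd]; omega
      rw [if_neg hA, if_neg (fun h => hc h.1)]
      rw [items_ofList_self _ (hndtake j), items_ofList_self _ (hnddrop j)]

-- ===== VERDICT (by name: the statement is the Claim_ definition above) =====
theorem podziel_spec : Claim_equal_podziel := by
  intro rozklad _ hpre
  unfold Spec_podziel
  exact podziel_eq rozklad hpre
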